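-- pv_equiv track=rewrite | github.com/casejade37/Git | BU CS/CS521/jaysong_hw_5_4.py | list_to_twice_words
-- ===== SOURCE A (Python) =====
-- def list_to_twice_words(my_list):
--     '''use a dict to check if the value is 2,
--     then append all keys to a result list and return that list'''
--     my_dict = dict()
--     for i in range(len(my_list)):
--         my_dict[my_list[i]] = my_dict.get(my_list[i], 0) + 1
--
--     res = []
--     for k, v in my_dict.items():
--         if v == 2:
--             res.append(k)
--     return res
-- ===== SOURCE B (Python) =====
-- def list_to_twice_words(my_list):
--     # Peel-by-value loop: repeatedly strip all occurrences of the current first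
--     # element; the drop in length is that value's multiplicity.
--     res = []
--     rest = my_list
--     while rest:
--         head = rest[0]
--         remaining = [x for x in rest if x != head]
--         if len(rest) - len(remaining) == 2:
--             res.append(head)
--         rest = remaining
--     return res
-- ===== Notes on version B (the rewrite author's own statement) =====
-- stated objective: alternative
-- what changed: Replaces A's single-pass counting dict plus items scan with an iterative peel loop: each round strips every occurrence of the current first element, reads its multiplicity off the length drop, and keeps it if that drop is 2.
import Mathlib
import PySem

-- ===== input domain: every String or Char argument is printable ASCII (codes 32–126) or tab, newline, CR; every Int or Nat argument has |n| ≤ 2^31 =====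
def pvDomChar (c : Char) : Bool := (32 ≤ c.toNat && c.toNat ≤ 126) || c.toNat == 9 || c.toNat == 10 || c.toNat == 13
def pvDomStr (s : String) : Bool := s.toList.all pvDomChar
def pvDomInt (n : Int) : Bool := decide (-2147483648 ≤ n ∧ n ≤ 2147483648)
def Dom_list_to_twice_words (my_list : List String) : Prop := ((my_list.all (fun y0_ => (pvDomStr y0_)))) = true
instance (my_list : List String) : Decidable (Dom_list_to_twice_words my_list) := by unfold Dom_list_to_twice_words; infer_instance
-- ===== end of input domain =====

-- B: iterative peel-by-value loop (strip all occurrences of the first element each round; the length drop is its multiplicity) instead of A's counting-dict pass; alternative decomposition, same output.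


-- ===== PORT A =====
def list_to_twice_words (my_list : List String) : List String :=
  let my_dict := (PySem.List.pyRange 0 (PySem.List.len my_list) 1).foldl
    (fun d i => d.insert (PySem.List.pyGetD my_list i "")
                         (d.getD (PySem.List.pyGetD my_list i "") 0 + 1))
    (PySem.Dict.empty : PySem.Dict String Int)
  my_dict.items.foldl (fun res kv => if kv.2 = 2 then res ++ [kv.1] else res) []

-- ===== PORT B =====
-- the while loop of Source B: state (res, rest); each round peels every occurrence of rest[0]
def pvPeel (res : List String) (rest : List String) : List String :=
  match rest with
  | [] => res
  | head :: tail =>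
    let remaining := (head :: tail).filter (fun x => x != head)
    pvPeel (if (((head :: tail).length : Int)) - (remaining.length : Int) = 2 then res ++ [head] else res)
           remaining
  termination_by rest.length
  decreasing_by
    simp only [List.filter_cons, bne_self_eq_false, Bool.false_eq_true, if_false]
    exact Nat.lt_succ_of_le (List.length_filter_le _ _)

def list_to_twice_words_alt (my_list : List String) : List String :=
  pvPeel [] my_list

-- ===== PRECONDITION & SPEC =====
def Spec_list_to_twice_words (my_list : List String) (out : List String) : Prop := out = list_to_twice_words_alt my_list
instance (my_list : List String) (out : List String) : Decidable (Spec_list_to_twice_words my_list out) := by unfold Spec_list_to_twice_words; infer_instance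

-- ===== CLAIM (what is proved, stated in full; the proofs are below) =====
def Claim_equal_list_to_twice_words : Prop := ∀ (my_list : List String), Dom_list_to_twice_words my_list → Spec_list_to_twice_words my_list (list_to_twice_words my_list)

-- ===== LEMMAS AND PROOFS =====

-- first-occurrence dedup commutes with filter
theorem pv_ofList_filter {α : Type} [BEq α] [LawfulBEq α] (p : α → Bool) (l : List α) :
    PySem.Set.ofList (l.filter p) = (PySem.Set.ofList l).filter p := by
  induction l with
  | nil => simp [PySem.Set.ofList_nil]
  | cons x xs ih =>
    by_cases hx : p x = true
    · simp only [List.filter_cons, hx, if_true, PySem.Set.ofList_cons, ih, PySem.Set.discard]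
      simp [List.filter_filter, Bool.and_comm]
    · have hcong : (PySem.Set.ofList xs).filter p
          = (PySem.Set.ofList xs).filter (fun a => p a && (!(a == x))) := by
        apply List.filter_congr
        intro a _
        by_cases hpa : p a = true
        · have hne : (a == x) = false := by
            refine beq_false_of_ne ?_
            intro h; subst h; simp [hpa] at hx
          simp [hpa, hne]
        · simp only [Bool.not_eq_true] at hpa
          simp [hpa]
      simp only [List.filter_cons, hx, Bool.false_eq_true, if_false, ih,
        PySem.Set.ofList_cons, PySem.Set.discard, List.filter_filter]
      exact hcong
-- multiplicity of a value as a length difference under filtering it out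
theorem pv_count_len {α : Type} [BEq α] [LawfulBEq α] (a : α) (l : List α) :
    l.length = l.count a + (l.filter (fun x => x != a)).length := by
  induction l with
  | nil => simp
  | cons x xs ih =>
    by_cases hx : x = a
    · subst hx; simp only [List.count_cons, List.filter_cons, bne_self_eq_false,
        Bool.false_eq_true, if_false, List.length_cons, BEq.rfl, if_true]
      omega
    · have h1 : (x == a) = false := beq_false_of_ne hx
      have h2 : (x != a) = true := by simp [bne, h1]
      simp only [List.count_cons, List.filter_cons, h1, h2, if_true, Bool.false_eq_true,
        if_false, List.length_cons]
      omega

-- B computes the first-occurrence-ordered values of multiplicity 2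
theorem pvPeel_eq (res rest : List String) :
    pvPeel res rest = res ++ (PySem.Set.ofList rest).filter (fun v => rest.count v == 2) := by
  fun_induction pvPeel res rest with
  | case1 res => simp [PySem.Set.ofList_nil]
  | case2 res head tail remaining ih =>
    simp only [dite_eq_ite] at ih
    rw [ih]
    have hrem : remaining = tail.filter (fun x => x != head) := by
      simp only [remaining, List.filter_cons, bne_self_eq_false, Bool.false_eq_true, if_false]
    have hlen : (head :: tail).length = (head :: tail).count head + remaining.length :=
      pv_count_len head (head :: tail)
    have hcond : ((((head :: tail).length : Int) - (remaining.length : Int) = 2)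
        ↔ (head :: tail).count head = 2) := by
      constructor <;> intro h <;> omega
    have hD : (PySem.Set.ofList tail).discard head = (PySem.Set.ofList remaining) := by
      rw [hrem, pv_ofList_filter]
      simp [PySem.Set.discard, bne]
    have hfc : (PySem.Set.ofList remaining).filter (fun v => (head :: tail).count v == 2)
        = (PySem.Set.ofList remaining).filter (fun v => remaining.count v == 2) := by
      apply List.filter_congr
      intro a ha
      have hamem : a ∈ remaining := (PySem.Set.mem_ofList _ _).mp ha
      have hane : (a != head) = true := by
        rw [hrem] at hamem
        exact (List.mem_filter.mp hamem).2
      have hne : a ≠ head := by simpa using hane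
      have h1 : (head :: tail).count a = tail.count a := by
        rw [List.count_cons, beq_false_of_ne (Ne.symm hne)]
        simp
      have h2 : remaining.count a = tail.count a := by
        rw [hrem]; exact List.count_filter hane
      rw [h1, h2]
    rw [PySem.Set.ofList_cons, List.filter_cons, hD, hfc]
    by_cases hc2 : (head :: tail).count head = 2
    · have hcInt := hcond.mpr hc2
      have hP : ((head :: tail).count head == 2) = true := beq_iff_eq.mpr hc2
      rw [if_pos hcInt, if_pos hP]
      simp [List.append_assoc]
    · have hcInt : ¬(((head :: tail).length : Int) - (remaining.length : Int) = 2) :=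
        fun h => hc2 (hcond.mp h)
      have hP : ¬(((head :: tail).count head == 2) = true) := by
        rw [beq_iff_eq]; exact hc2
      rw [if_neg hcInt, if_neg hP]

-- A computes the same list
theorem portA_eq (my_list : List String) :
    list_to_twice_words my_list = (PySem.Set.ofList my_list).filter (fun v => my_list.count v == 2) := by
  unfold list_to_twice_words
  simp only []
  rw [PySem.List.foldl_pyRange_zero_pyGetD my_list ""
        (fun (d : PySem.Dict String Int) x => d.insert x (d.getD x 0 + 1)) PySem.Dict.empty,
      PySem.Dict.foldl_insert_getD_add_one_eq_counter, PySem.Dict.items_counter]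
  rw [show (fun (res : List String) (kv : String × Int) => if kv.2 = 2 then res ++ [kv.1] else res)
        = (fun res kv => if (fun (kv : String × Int) => decide (kv.2 = 2)) kv = true then res ++ [(fun (kv : String × Int) => kv.1) kv] else res) by
      funext res kv; simp,
    PySem.List.foldl_append_if, List.filter_map, List.map_map]
  simp only [List.nil_append, Function.comp_def]
  rw [List.map_id']
  congr 1
  funext v
  by_cases h : List.count v my_list = 2
  · simp [h]
  · have h1 : ¬((List.count v my_list : Int) = 2) := by omega
    simp [h1, h]

-- ===== VERDICT (by name: the statement is the Claim_ definition above) =====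
theorem list_to_twice_words_spec : Claim_equal_list_to_twice_words := by
  intro my_list _
  unfold Spec_list_to_twice_words list_to_twice_words_alt
  rw [portA_eq, pvPeel_eq, List.nil_append]
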